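-- pv_equiv track=rewrite | github.com/gezmi/af_scripts | convert_between_a3m_json.py | split_sequence_by_chains
-- ===== SOURCE A (Python) =====
-- def split_sequence_by_chains(sequence, lengths):
-- 	"""
-- 	Split a sequence into chains based on specified lengths.
--
-- 	Args:
-- 		sequence (str): The full protein sequence
-- 		lengths (list): List of integer lengths for each chain
--
-- 	Returns:
-- 		list: List of split chain sequences
-- 	"""
-- 	result = []
-- 	current_pos = 0
--
-- 	for target_length in lengths:
-- 		chain_seq = ""
-- 		actual_length = 0
--
-- 		# Keep adding characters until we reach the target length for this chain
-- 		while actual_length < target_length and current_pos < len(sequence):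
-- 			char = sequence[current_pos]
-- 			chain_seq += char
--
-- 			# Only count uppercase letters toward the actual length
-- 			if not char.islower():
-- 				actual_length += 1
--
-- 			current_pos += 1
--
-- 		result.append(chain_seq)
--
-- 	return result
-- ===== SOURCE B (Python) =====
-- def split_sequence_by_chains(sequence, lengths):
--     """
--     Split a sequence into chains based on specified lengths
--     (only non-lowercase characters count toward a chain's length).
--     """
--     # indices of the characters that count toward length
--     marks = [i for i, ch in enumerate(sequence) if not ch.islower()]
--     result = []
--     current_pos = 0
--     consumed = 0  # number of marks strictly before current_pos
--     for target_length in lengths: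
--         if target_length <= 0:
--             end = current_pos
--         else:
--             k = consumed + target_length
--             if k <= len(marks):
--                 end = marks[k - 1] + 1
--                 consumed = k
--             else:
--                 end = len(sequence)
--                 consumed = len(marks)
--         result.append(sequence[current_pos:end])
--         current_pos = end
--     return result
-- ===== Notes on version B (the rewrite author's own statement) =====
-- stated objective: alternative
-- what changed: B precomputes a table of the indices of the non-lowercase (counting) characters once, and each chain is then produced by one table lookup plus a slice, instead of A's inner character-by-character while loop that grows each chain string one character at a time.
import Mathlib
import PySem

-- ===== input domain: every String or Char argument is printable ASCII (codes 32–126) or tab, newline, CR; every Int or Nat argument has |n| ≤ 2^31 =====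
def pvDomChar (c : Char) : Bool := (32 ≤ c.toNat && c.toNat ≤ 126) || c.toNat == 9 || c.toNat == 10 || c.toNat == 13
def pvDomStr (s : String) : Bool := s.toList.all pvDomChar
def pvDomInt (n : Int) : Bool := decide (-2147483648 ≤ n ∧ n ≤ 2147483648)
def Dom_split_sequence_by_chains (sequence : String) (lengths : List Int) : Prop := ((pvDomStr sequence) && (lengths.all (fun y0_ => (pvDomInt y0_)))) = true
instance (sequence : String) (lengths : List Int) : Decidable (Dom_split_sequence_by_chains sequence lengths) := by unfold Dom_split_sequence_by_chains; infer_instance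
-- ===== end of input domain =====

-- B replaces A's per-chain character-by-character while loop (string grown one char
-- at a time) by a precomputed table of the indices of the counting (non-lowercase)
-- characters plus slicing (objective: alternative algorithm, no inner char loop).

-- ===== PORT A =====
-- inner while loop of A: consume chars from position p until actual_length reaches t
def pvInnerA (s : List Char) (t : Int) (p : Nat) (chain : List Char) (al : Int) : List Char × Nat :=
  if h : al < t ∧ p < s.length then
    let c := s[p]'h.2
    pvInnerA s t (p + 1) (chain ++ [c]) (if PySem.Chars.islower c then al else al + 1)
  else (chain, p)
termination_by s.length - p
decreasing_by omega

-- loop body of A; state = (result, current_pos)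
def pvStepA (s : List Char) (st : List String × Nat) (t : Int) : List String × Nat :=
  let r := pvInnerA s t st.2 [] 0
  (st.1 ++ [String.ofList r.1], r.2)

def split_sequence_by_chains (sequence : String) (lengths : List Int) : List String :=
  (lengths.foldl (pvStepA sequence.toList) ([], 0)).1

-- ===== PORT B =====
-- marks = [i for i, ch in enumerate(sequence) if not ch.islower()]
def pvMarks (s : List Char) : List Int :=
  (PySem.List.enumerate s 0).filterMap
    (fun ic => if PySem.Chars.islower ic.2 then none else some ic.1)

-- loop body of B; state = (result, (current_pos, consumed))
def pvStepB (s : List Char) (marks : List Int) (st : List String × (Int × Int)) (t : Int) :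
    List String × (Int × Int) :=
  let ec : Int × Int :=
    if t ≤ 0 then (st.2.1, st.2.2)
    else
      let k := st.2.2 + t
      if k ≤ (marks.length : Int) then (PySem.List.pyGetD marks (k - 1) 0 + 1, k)
      else ((s.length : Int), (marks.length : Int))
  (st.1 ++ [String.ofList (PySem.List.slice s (some st.2.1) (some ec.1))], ec)

def split_sequence_by_chains_alt (sequence : String) (lengths : List Int) : List String :=
  let s := sequence.toList
  (lengths.foldl (pvStepB s (pvMarks s)) ([], (0, 0))).1

-- ===== PRECONDITION & SPEC =====
def Spec_split_sequence_by_chains (sequence : String) (lengths : List Int) (out : List String) : Prop := out = split_sequence_by_chains_alt sequence lengths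
instance (sequence : String) (lengths : List Int) (out : List String) : Decidable (Spec_split_sequence_by_chains sequence lengths out) := by unfold Spec_split_sequence_by_chains; infer_instance

-- ===== CLAIM (what is proved, stated in full; the proofs are below) =====
def Claim_equal_split_sequence_by_chains : Prop := ∀ (sequence : String) (lengths : List Int), Dom_split_sequence_by_chains sequence lengths → Spec_split_sequence_by_chains sequence lengths (split_sequence_by_chains sequence lengths)

-- ===== LEMMAS AND PROOFS =====

-- common specification: take one chain of t counting (non-lowercase) characters
def takeChain (t : Int) (l : List Char) : List Char × List Char :=
  if t ≤ 0 then ([], l)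
  else
    match l with
    | [] => ([], [])
    | c :: cs =>
      let r := takeChain (if PySem.Chars.islower c then t else t - 1) cs
      (c :: r.1, r.2)
termination_by l.length

def splitSpec : List Int → List Char → List (List Char)
  | [], _ => []
  | t :: ts, l => (takeChain t l).1 :: splitSpec ts (takeChain t l).2

-- recursive characterisation of the mark indices (as Nat)
def marksN : List Char → List Nat
  | [] => []
  | c :: cs =>
    if PySem.Chars.islower c then (marksN cs).map (· + 1)
    else 0 :: (marksN cs).map (· + 1)

-- where takeChain t l stops, read off marksN
def endOfN (t : Int) (l : List Char) : Nat :=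
  if t ≤ 0 then 0
  else if t.toNat ≤ (marksN l).length then (marksN l).getD (t.toNat - 1) 0 + 1
  else l.length

lemma pvMarks_aux (s : List Char) : ∀ st : Int,
    (PySem.List.enumerate s st).filterMap
        (fun ic => if PySem.Chars.islower ic.2 then none else some ic.1)
      = (marksN s).map (fun n : Nat => st + (n : Int)) := by
  induction s with
  | nil => intro st; simp [PySem.List.enumerate_nil, marksN]
  | cons c cs ih =>
    intro st
    rw [PySem.List.enumerate_cons, List.filterMap_cons]
    by_cases h : PySem.Chars.islower c
    · simp only [h, marksN, if_true, ih (st + 1), List.map_map]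
      congr 1; funext n; simp only [Function.comp_apply]; push_cast; ring
    · simp only [h, marksN, Bool.false_eq_true, if_false, ih (st + 1), List.map_map,
        List.map_cons]
      simp only [Nat.cast_zero, add_zero, List.cons.injEq, true_and]
      congr 1; funext n; simp only [Function.comp_apply]; push_cast; ring

lemma pvMarks_eq (s : List Char) : pvMarks s = (marksN s).map (fun n : Nat => (n : Int)) := by
  unfold pvMarks
  rw [pvMarks_aux s 0]
  simp

lemma marksN_lt (s : List Char) : ∀ x ∈ marksN s, x < s.length := by
  induction s with
  | nil => simp [marksN]
  | cons c cs ih =>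
    intro x hx
    by_cases h : PySem.Chars.islower c <;>
      simp [marksN, h] at hx <;> simp
    · obtain ⟨a, ha, rfl⟩ := hx
      have := ih a ha; omega
    · rcases hx with rfl | ⟨a, ha, rfl⟩
      · omega
      · have := ih a ha; omega

lemma takeChain_append (t : Int) (l : List Char) :
    (takeChain t l).1 ++ (takeChain t l).2 = l := by
  induction l generalizing t with
  | nil => rw [takeChain]; split <;> simp
  | cons c cs ih => rw [takeChain]; split <;> simp [ih]

lemma takeChain_eq (l : List Char) : ∀ t : Int,
    takeChain t l = (l.take (endOfN t l), l.drop (endOfN t l)) := by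
  induction l with
  | nil =>
    intro t; rw [takeChain, endOfN]
    split <;> simp
  | cons c cs ih =>
    intro t
    rw [takeChain]
    split
    · rename_i ht; rw [endOfN, if_pos ht]; simp
    · rename_i ht
      rw [not_le] at ht
      by_cases h : PySem.Chars.islower c
      · -- t' = t
        simp only [h, if_true]
        rw [ih t]
        have hnt : ¬ t ≤ 0 := by omega
        have he : endOfN t (c :: cs) = endOfN t cs + 1 := by
          simp only [endOfN, hnt, if_false, marksN, h, if_true, List.length_map]
          by_cases hle : t.toNat ≤ (marksN cs).length
          · rw [if_pos hle, if_pos hle]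
            have hidx : t.toNat - 1 < (marksN cs).length := by omega
            rw [List.getD_eq_getElem _ _ (by simpa using hidx), List.getElem_map,
                List.getD_eq_getElem _ _ hidx]
          · rw [if_neg hle, if_neg hle]; simp
        rw [he]; simp
      · simp only [h, if_false, Bool.false_eq_true]
        by_cases h1 : t = 1
        · subst h1
          rw [show (1:Int) - 1 = 0 by norm_num, ih 0]
          have e0 : endOfN 0 cs = 0 := by rw [endOfN, if_pos (by omega)]
          have e1 : endOfN 1 (c :: cs) = 1 := by
            rw [endOfN, if_neg (by omega)]
            simp [marksN, h]
          rw [e0, e1]; simp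
        · rw [ih (t - 1)]
          have ht2 : 2 ≤ t := by omega
          have hnt : ¬ t ≤ 0 := by omega
          have hnt1 : ¬ t - 1 ≤ 0 := by omega
          have htn : t.toNat = (t - 1).toNat + 1 := by omega
          have he : endOfN t (c :: cs) = endOfN (t - 1) cs + 1 := by
            simp only [endOfN, hnt, hnt1, if_false, marksN, h, Bool.false_eq_true,
              List.length_cons, List.length_map]
            by_cases hle : (t - 1).toNat ≤ (marksN cs).length
            · rw [if_pos (by omega), if_pos hle]
              have hidx : (t - 1).toNat - 1 < (marksN cs).length := by omega
              have hi2 : t.toNat - 1 = ((t - 1).toNat - 1) + 1 := by omega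
              rw [hi2, List.getD_cons_succ, List.getD_eq_getElem _ _ (by simpa using hidx),
                  List.getElem_map, List.getD_eq_getElem _ _ hidx]
            · rw [if_neg (by omega), if_neg hle]
          rw [he]; simp

lemma marksN_drop (l : List Char) : ∀ i : Nat, i < (marksN l).length →
    (marksN l).drop (i + 1)
      = (marksN (l.drop ((marksN l).getD i 0 + 1))).map (· + ((marksN l).getD i 0 + 1)) := by
  induction l with
  | nil => simp [marksN]
  | cons c cs ih =>
    intro i hi
    by_cases h : PySem.Chars.islower c
    · simp only [marksN, h, if_true, List.length_map] at hi ⊢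
      rw [List.getD_eq_getElem _ _ (by simpa using hi), List.getElem_map,
          ← List.map_drop]
      rw [ih i (by simpa using hi)]
      rw [List.getD_eq_getElem _ _ (by simpa using hi)]
      simp only [List.map_map, List.drop_succ_cons]
      · exact List.map_congr_left (fun n _ => by simp only [Function.comp_apply]; omega)
    · simp only [marksN, h, Bool.false_eq_true, if_false, List.length_cons,
        List.length_map] at hi ⊢
      match i with
      | 0 => simp
      | j + 1 =>
        rw [List.getD_cons_succ, List.drop_succ_cons,
            List.getD_eq_getElem _ _ (by simpa using (by omega : j < (marksN cs).length)),
            List.getElem_map, ← List.map_drop, ih j (by omega),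
            List.getD_eq_getElem _ _ (by omega : j < (marksN cs).length)]
        simp only [List.map_map, List.drop_succ_cons]
        exact List.map_congr_left (fun n _ => by simp only [Function.comp_apply]; omega)

lemma pvInnerA_eq (s : List Char) (t : Int) : ∀ (p : Nat) (chain : List Char) (al : Int),
    pvInnerA s t p chain al
      = (chain ++ (takeChain (t - al) (s.drop p)).1,
         p + (takeChain (t - al) (s.drop p)).1.length) := by
  intro p
  induction hp : s.length - p using Nat.strong_induction_on generalizing p with
  | _ n ihn =>
    intro chain al
    rw [pvInnerA]
    by_cases h : al < t ∧ p < s.length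
    · rw [dif_pos h]
      have hdrop : s.drop p = s[p]'h.2 :: s.drop (p + 1) :=
        (List.drop_eq_getElem_cons h.2).trans rfl
      by_cases hl : PySem.Chars.islower (s[p]'h.2)
      · simp only [hl, if_true]
        rw [ihn (s.length - (p + 1)) (by omega) (p + 1) rfl, hdrop, takeChain,
            if_neg (by omega)]
        simp only [hl, if_true, Prod.mk.injEq, List.append_assoc,
          List.singleton_append, List.length_cons]
        exact ⟨trivial, by omega⟩
      · simp only [hl, if_false, Bool.false_eq_true]
        rw [ihn (s.length - (p + 1)) (by omega) (p + 1) rfl, hdrop, takeChain,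
            if_neg (by omega), show t - (al + 1) = t - al - 1 by ring]
        simp only [hl, if_false, Bool.false_eq_true, Prod.mk.injEq, List.append_assoc,
          List.singleton_append, List.length_cons]
        exact ⟨trivial, by omega⟩
    · rw [dif_neg h]
      rcases not_and_or.mp h with h1 | h2
      · rw [takeChain.eq_def]; rw [if_pos (by omega)]; simp
      · have : s.drop p = [] := List.drop_eq_nil_of_le (by omega)
        rw [this, takeChain]
        split <;> simp

lemma foldA (s : List Char) : ∀ (ts : List Int) (acc : List String) (p : Nat),
    p ≤ s.length →
    (ts.foldl (pvStepA s) (acc, p)).1 = acc ++ (splitSpec ts (s.drop p)).map String.ofList := by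
  intro ts
  induction ts with
  | nil => intro acc p _; simp [splitSpec]
  | cons t ts ih =>
    intro acc p hp
    rw [List.foldl_cons]
    have hstep : pvStepA s (acc, p) t
        = (acc ++ [String.ofList (takeChain t (s.drop p)).1],
           p + (takeChain t (s.drop p)).1.length) := by
      unfold pvStepA
      rw [pvInnerA_eq s t p [] 0]
      simp
    rw [hstep]
    have happ : (takeChain t (s.drop p)).1 ++ (takeChain t (s.drop p)).2 = s.drop p :=
      takeChain_append t (s.drop p)
    set tc := takeChain t (s.drop p) with htc
    have hlen : tc.1.length ≤ s.length - p := by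
      have := congrArg List.length happ
      simp at this
      omega
    have h1 : (s.drop p).drop tc.1.length = tc.2 := by
      rw [← happ]; exact List.drop_left
    have hrest : s.drop (p + tc.1.length) = tc.2 := by
      rw [← h1, List.drop_drop]
    rw [ih _ (p + tc.1.length) (by omega), hrest]
    simp [splitSpec]
    rw [← htc]
    exact ⟨rfl, rfl⟩

lemma foldB (s : List Char) : ∀ (ts : List Int) (acc : List String) (p c : Nat),
    p ≤ s.length → c ≤ (marksN s).length →
    (marksN s).drop c = (marksN (s.drop p)).map (· + p) →
    (ts.foldl (pvStepB s (pvMarks s)) (acc, ((p : Int), (c : Int)))).1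
      = acc ++ (splitSpec ts (s.drop p)).map String.ofList := by
  intro ts
  induction ts with
  | nil => intro acc p c _ _ _; simp [splitSpec]
  | cons t ts ih =>
    intro acc p c hp hc hinv
    have hmlen : (pvMarks s).length = (marksN s).length := by
      rw [pvMarks_eq]; simp
    have hfxlen : (marksN (s.drop p)).length = (marksN s).length - c := by
      have := congrArg List.length hinv
      simp at this
      omega
    rw [List.foldl_cons]
    by_cases ht : t ≤ 0
    · have hstep : pvStepB s (pvMarks s) (acc, ((p : Int), (c : Int))) t
          = (acc ++ [String.ofList []], ((p : Int), (c : Int))) := by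
        unfold pvStepB
        simp only [ht, if_pos]
        rw [show PySem.List.slice s (some (p : Int)) (some (p : Int))
              = (s.drop p).take (p - p) from PySem.List.slice_natCast s p p]
        simp
      rw [hstep, ih _ p c hp hc hinv]
      rw [splitSpec, takeChain_eq, endOfN, if_pos ht]
      simp
    · -- t > 0
      have htn : t = ((t.toNat : Nat) : Int) := by omega
      set tn := t.toNat with htn'
      have htn1 : 1 ≤ tn := by omega
      by_cases hk : ((c : Int) + t ≤ ((pvMarks s).length : Int))
      · -- enough marks
        have hkn : c + tn ≤ (marksN s).length := by
          rw [hmlen] at hk; omega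
        have htnfx : tn ≤ (marksN (s.drop p)).length := by omega
        have hidx : c + tn - 1 < (marksN s).length := by omega
        have hidx2 : tn - 1 < (marksN (s.drop p)).length := by omega
        set mv := (marksN (s.drop p)).getD (tn - 1) 0 with hmv
        have hmv_mem : mv ∈ marksN (s.drop p) := by
          rw [hmv, List.getD_eq_getElem _ _ hidx2]
          exact List.getElem_mem _
        have hmv_lt : mv < s.length - p := by
          have := marksN_lt (s.drop p) mv hmv_mem
          simpa using this
        -- the mark A reads: ms[c + tn - 1] = mv + p
        have hms_get : (marksN s).getD (c + tn - 1) 0 = mv + p := by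
          rw [List.getD_eq_getElem _ _ hidx]
          have h1 : (marksN s)[c + tn - 1] = ((marksN s).drop c)[tn - 1]'(by
              simp [List.length_drop]; omega) := by
            rw [List.getElem_drop]
            congr 1
            omega
          rw [h1]
          have h2 : ((marksN s).drop c)[tn - 1]'(by simp [List.length_drop]; omega)
              = ((marksN (s.drop p)).map (· + p))[tn - 1]'(by simp; omega) := by
            simp only [hinv]
          rw [h2, List.getElem_map, hmv, List.getD_eq_getElem _ _ hidx2]
        have hget : PySem.List.pyGetD (pvMarks s) ((c : Int) + t - 1) 0
            = ((mv + p : Nat) : Int) := by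
          rw [show ((c : Int) + t - 1) = ((c + tn - 1 : Nat) : Int) by omega,
              PySem.List.pyGetD_natCast, pvMarks_eq]
          rw [List.getD_eq_getElem _ _ (by simpa using hidx), List.getElem_map]
          congr 1
          rw [← hms_get, List.getD_eq_getElem _ _ hidx]
        have hstep : pvStepB s (pvMarks s) (acc, ((p : Int), (c : Int))) t
            = (acc ++ [String.ofList ((s.drop p).take (mv + 1))],
               (((p + mv + 1 : Nat) : Int), ((c + tn : Nat) : Int))) := by
          unfold pvStepB
          simp only [ht, if_false, hk, if_pos]
          rw [hget]
          rw [show ((mv + p : Nat) : Int) + 1 = ((p + mv + 1 : Nat) : Int) by push_cast; ring]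
          rw [show PySem.List.slice s (some (p : Int)) (some ((p + mv + 1 : Nat) : Int))
                = (s.drop p).take (p + mv + 1 - p) from PySem.List.slice_natCast s p (p + mv + 1)]
          rw [show p + mv + 1 - p = mv + 1 from by omega]
          rw [show (c : Int) + t = ((c + tn : Nat) : Int) by push_cast; omega]
        rw [hstep]
        have hp' : p + mv + 1 ≤ s.length := by omega
        have hinv' : (marksN s).drop (c + tn)
            = (marksN (s.drop (p + mv + 1))).map (· + (p + mv + 1)) := by
          have e1 : (marksN s).drop (c + tn) = ((marksN s).drop c).drop tn := by
            rw [List.drop_drop]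
          have e2 := marksN_drop (s.drop p) (tn - 1) hidx2
          rw [show tn - 1 + 1 = tn from by omega] at e2
          rw [e1, hinv, ← List.map_drop, e2, List.map_map]
          rw [show (s.drop p).drop ((marksN (s.drop p)).getD (tn - 1) 0 + 1)
                = s.drop (p + mv + 1) from by
              rw [List.drop_drop, ← hmv, ← Nat.add_assoc]]
          refine List.map_congr_left (fun n _ => ?_)
          simp only [Function.comp_apply, ← hmv]
          omega
        rw [ih _ (p + mv + 1) (c + tn) hp' hkn hinv']
        have hend : endOfN t (s.drop p) = mv + 1 := by
          rw [endOfN, if_neg ht, if_pos htnfx]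
        rw [show splitSpec (t :: ts) (s.drop p)
              = (takeChain t (s.drop p)).1 :: splitSpec ts (takeChain t (s.drop p)).2 from rfl,
            takeChain_eq, hend]
        rw [show (s.drop p).drop (mv + 1) = s.drop (p + mv + 1) from by
              rw [List.drop_drop, ← Nat.add_assoc]]
        simp
      · -- not enough marks: chain runs to the end of the sequence
        have hkn2 : (marksN s).length < c + tn := by
          rw [hmlen] at hk; omega
        have htnfx2 : ¬ t.toNat ≤ (marksN (s.drop p)).length := by omega
        have hstep : pvStepB s (pvMarks s) (acc, ((p : Int), (c : Int))) t
            = (acc ++ [String.ofList (s.drop p)],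
               ((s.length : Int), (((marksN s).length : Nat) : Int))) := by
          unfold pvStepB
          simp only [ht, if_false, hk]
          rw [show PySem.List.slice s (some (p : Int)) (some ((s.length : Nat) : Int))
                = (s.drop p).take (s.length - p) from PySem.List.slice_natCast s p s.length]
          rw [List.take_of_length_le (by simp), hmlen]
        rw [hstep]
        have hinv' : (marksN s).drop (marksN s).length
            = (marksN (s.drop s.length)).map (· + s.length) := by
          simp [List.drop_length, marksN]
        rw [ih _ s.length (marksN s).length (le_refl _) (le_refl _) hinv']
        have hend : endOfN t (s.drop p) = (s.drop p).length := by
          rw [endOfN, if_neg ht, if_neg htnfx2]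
        rw [show splitSpec (t :: ts) (s.drop p)
              = (takeChain t (s.drop p)).1 :: splitSpec ts (takeChain t (s.drop p)).2 from rfl,
            takeChain_eq, hend]
        simp [List.drop_length]
        refine ⟨by rw [List.take_of_length_le (by simp)], ?_⟩
        rw [show p + (s.length - p) = s.length from by omega, List.drop_length]

-- ===== VERDICT (by name: the statement is the Claim_ definition above) =====
theorem split_sequence_by_chains_spec : Claim_equal_split_sequence_by_chains := by
  intro sequence lengths _
  show split_sequence_by_chains sequence lengths = split_sequence_by_chains_alt sequence lengths
  have hA := foldA sequence.toList lengths [] 0 (by omega)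
  have hB := foldB sequence.toList lengths [] 0 0 (by omega) (by omega) (by simp)
  simp only [Nat.cast_zero] at hA hB
  unfold split_sequence_by_chains split_sequence_by_chains_alt
  rw [hA, hB]
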